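-- pv_equiv track=rewrite | github.com/Dmdv/Awesome-Full-Stack-Web-Developer | algorithm_and_data_structure/algorithmic_toolbox_coursera_course/problems/02_greedy_algorithms_starter_files/different_summands/different_summands.py | form_output
-- ===== SOURCE A (Python) =====
-- def form_output(prizes, winners):
--     a = []
--     won_prizes = 0
--     for i in range(1, winners):
--         a.append(i)
--         won_prizes += i
--     a.append(prizes - won_prizes)
--     return a
-- ===== SOURCE B (Python) =====
-- def form_output(prizes, winners):
--     n = max(winners - 1, 0)
--     a = list(range(1, winners))
--     a.append(prizes - n * (n + 1) // 2)
--     return a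
-- ===== Notes on version B (the rewrite author's own statement) =====
-- stated objective: idiomatic
-- what changed: Replaces the incremental append/accumulator loop with a direct list(range(1, winners)) build and a Gauss closed-form triangular number n*(n+1)//2 for the accumulated total.
import Mathlib
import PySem

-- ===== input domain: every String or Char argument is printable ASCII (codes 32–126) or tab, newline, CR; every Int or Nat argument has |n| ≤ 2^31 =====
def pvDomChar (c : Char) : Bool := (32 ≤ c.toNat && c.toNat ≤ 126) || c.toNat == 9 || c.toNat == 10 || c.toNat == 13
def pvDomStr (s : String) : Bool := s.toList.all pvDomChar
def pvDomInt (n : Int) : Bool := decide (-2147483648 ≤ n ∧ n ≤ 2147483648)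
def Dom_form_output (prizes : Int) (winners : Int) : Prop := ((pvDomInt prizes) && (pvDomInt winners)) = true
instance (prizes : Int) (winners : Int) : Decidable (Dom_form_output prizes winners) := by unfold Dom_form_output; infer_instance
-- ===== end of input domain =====

-- B replaces A's append/accumulator loop with a direct range build and the Gauss
-- closed form n*(n+1)//2 for the accumulated total (objective: idiomatic).

-- ===== PORT A =====
def form_output (prizes : Int) (winners : Int) : List Int :=
  let st := (PySem.List.pyRange 1 winners 1).foldl
    (fun (s : List Int × Int) i => (s.1 ++ [i], s.2 + i)) ([], 0)
  st.1 ++ [prizes - st.2]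

-- ===== PORT B =====
def form_output_alt (prizes : Int) (winners : Int) : List Int :=
  let n : Int := max (winners - 1) 0
  PySem.List.pyRange 1 winners 1 ++ [prizes - PySem.Int.floordiv (n * (n + 1)) 2]

-- ===== PRECONDITION & SPEC =====
def Spec_form_output (prizes : Int) (winners : Int) (out : List Int) : Prop := out = form_output_alt prizes winners
instance (prizes : Int) (winners : Int) (out : List Int) : Decidable (Spec_form_output prizes winners out) := by unfold Spec_form_output; infer_instance

-- ===== CLAIM (what is proved, stated in full; the proofs are below) =====
def Claim_equal_form_output : Prop := ∀ (prizes : Int) (winners : Int), Dom_form_output prizes winners → Spec_form_output prizes winners (form_output prizes winners)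

-- ===== LEMMAS AND PROOFS =====

-- A's loop accumulates the visited elements and their running sum.
theorem pv_foldl_acc (l : List Int) (acc : List Int) (s : Int) :
    l.foldl (fun (st : List Int × Int) i => (st.1 ++ [i], st.2 + i)) (acc, s)
      = (acc ++ l, s + l.sum) := by
  induction l generalizing acc s with
  | nil => simp
  | cons x xs ih => simp [ih, add_assoc]

-- The sum of range(1, w) is the triangular number of n = max(w-1, 0).
theorem pv_sum_range (w : Int) :
    (PySem.List.pyRange 1 w 1).sum
      = PySem.Int.floordiv (max (w - 1) 0 * (max (w - 1) 0 + 1)) 2 := by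
  rw [PySem.List.pyRange_one]
  set n : Nat := (w - 1).toNat with hn
  have hmax : max (w - 1) 0 = (n : Int) := by omega
  rw [hmax]
  have h2 : 2 * ((List.range n).map (fun k : Nat => (1 : Int) + k)).sum = (n : Int) * ((n : Int) + 1) := by
    induction n with
    | zero => simp
    | succ m ih =>
      rw [List.range_succ]
      simp only [List.map_append, List.sum_append, List.map_cons, List.map_nil,
        List.sum_cons, List.sum_nil]
      push_cast
      push_cast at ih
      linarith
  rw [PySem.Int.floordiv_eq_ediv_of_pos (by omega)]
  omega

-- ===== VERDICT (by name: the statement is the Claim_ definition above) =====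
theorem form_output_spec : Claim_equal_form_output := by
  intro prizes winners _
  unfold Spec_form_output form_output form_output_alt
  simp only [pv_foldl_acc, List.nil_append]
  rw [pv_sum_range]
  ring_nf
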